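-- pv_equiv track=rewrite | github.com/long2double/Algorithms | 你也能看得懂的Python算法书/哈希算法/单词模式匹配.py | temple
-- ===== SOURCE A (Python) =====
-- def temple(refer, target):
--     if len(refer) != len(target):
--         return False
--
--     hash = {}
--     used = {}
--     for i in range(len(refer)):
--         if refer[i] not in hash:
--             if target[i] in used:
--                 return False
--             hash[refer[i]] = target[i]
--             used[target[i]] = True
--         else:
--             if hash[refer[i]] != target[i]:
--                 return False
--     return True
-- ===== SOURCE B (Python) =====
-- def temple(refer, target):
--     if len(refer) != len(target):
--         return False
--     def enc(seq):
--         first = {}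
--         out = []
--         for i, x in enumerate(seq):
--             if x not in first:
--                 first[x] = i
--             out.append(first[x])
--         return out
--     return enc(refer) == enc(target)
-- ===== Notes on version B (the rewrite author's own statement) =====
-- stated objective: alternative
-- what changed: Replaces A's incremental forward-map plus used-set consistency check with computing a first-occurrence-index encoding of each sequence independently and comparing the two encodings.
import Mathlib
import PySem

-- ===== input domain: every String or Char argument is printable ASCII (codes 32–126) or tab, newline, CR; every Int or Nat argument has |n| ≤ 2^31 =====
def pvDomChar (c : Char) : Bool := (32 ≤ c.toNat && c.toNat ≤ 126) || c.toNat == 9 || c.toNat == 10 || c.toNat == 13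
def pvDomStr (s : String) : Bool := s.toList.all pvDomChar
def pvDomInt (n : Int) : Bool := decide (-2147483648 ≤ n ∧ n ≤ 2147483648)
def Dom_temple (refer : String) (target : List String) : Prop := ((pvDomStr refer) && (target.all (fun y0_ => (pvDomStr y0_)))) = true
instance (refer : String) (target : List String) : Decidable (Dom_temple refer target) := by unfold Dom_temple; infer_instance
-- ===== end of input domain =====

-- B replaces A's incremental forward-map + used-set consistency check by computing a
-- first-occurrence-index encoding of each sequence independently and comparing the encodings
-- (objective: alternative — same O(n) cost, different algorithm).

-- ===== PORT A =====
-- loop over the paired elements (Python indexes refer[i]/target[i] after the length check,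
-- which visits exactly the pairs of the zip), carrying the two dicts `hash` and `used`
def templeGo (ps : List (Char × String)) (h : PySem.Dict Char String)
    (u : PySem.Dict String Bool) : Bool :=
  match ps with
  | [] => true
  | (c, s) :: rest =>
    if ¬ h.contains c then
      if u.contains s then false
      else templeGo rest (h.insert c s) (u.insert s true)
    else if h.get? c ≠ some s then false
    else templeGo rest h u

def temple (refer : String) (target : List String) : Bool :=
  if PySem.Str.len refer ≠ (target.length : Int) then false
  else templeGo (refer.toList.zip target) PySem.Dict.empty PySem.Dict.empty

-- ===== PORT B =====
-- Source B's enc loop: first-occurrence dict filled while scanning, out.append(first[x])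
def encLoop {α : Type} [BEq α] (seq : List α) (i : Int) (first : PySem.Dict α Int)
    (out : List Int) : List Int :=
  match seq with
  | [] => out
  | x :: rest =>
    let first' := if ¬ first.contains x then first.insert x i else first
    encLoop rest (i + 1) first' (out ++ [first'.getD x 0])

def encB {α : Type} [BEq α] (seq : List α) : List Int :=
  encLoop seq 0 PySem.Dict.empty []

def temple_alt (refer : String) (target : List String) : Bool :=
  if PySem.Str.len refer ≠ (target.length : Int) then false
  else encB refer.toList == encB target

-- ===== PRECONDITION & SPEC =====
def Spec_temple (refer : String) (target : List String) (out : Bool) : Prop := out = temple_alt refer target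
instance (refer : String) (target : List String) (out : Bool) : Decidable (Spec_temple refer target out) := by unfold Spec_temple; infer_instance

-- ===== CLAIM (what is proved, stated in full; the proofs are below) =====
def Claim_equal_temple : Prop := ∀ (refer : String) (target : List String), Dom_temple refer target → Spec_temple refer target (temple refer target)

-- ===== LEMMAS AND PROOFS =====

-- first occurrence index of x in l (meaningful when x ∈ l)
def firstIdx {α : Type} [DecidableEq α] : List α → α → Nat
  | [], _ => 0
  | y :: r, x => if y = x then 0 else firstIdx r x + 1

theorem firstIdx_append_of_mem {α : Type} [DecidableEq α] {pre : List α} (rest : List α)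
    {x : α} (hx : x ∈ pre) : firstIdx (pre ++ rest) x = firstIdx pre x := by
  induction pre with
  | nil => cases hx
  | cons y p ih =>
    simp only [List.cons_append, firstIdx]
    by_cases hyx : y = x
    · simp [hyx]
    · rcases List.mem_cons.mp hx with h | h
      · exact absurd h.symm hyx
      · simp [hyx, ih h]

theorem firstIdx_append_self {α : Type} [DecidableEq α] {pre : List α} (rest : List α)
    {x : α} (hx : x ∉ pre) : firstIdx (pre ++ x :: rest) x = pre.length := by
  induction pre with
  | nil => simp [firstIdx]
  | cons y p ih =>
    have hyx : y ≠ x := fun h => hx (by simp [h])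
    have hxp : x ∉ p := fun h => hx (by simp [h])
    simp [firstIdx, hyx, ih hxp]

theorem firstIdx_lt_length {α : Type} [DecidableEq α] {l : List α} {x : α} (hx : x ∈ l) :
    firstIdx l x < l.length := by
  induction l with
  | nil => cases hx
  | cons y r ih =>
    simp only [firstIdx, List.length_cons]
    by_cases hyx : y = x
    · simp [hyx]
    · rcases List.mem_cons.mp hx with h | h
      · exact absurd h.symm hyx
      · simpa [hyx] using Nat.succ_lt_succ (ih h)

theorem getElem_firstIdx {α : Type} [DecidableEq α] {l : List α} {x : α} (hx : x ∈ l) :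
    l[firstIdx l x]'(firstIdx_lt_length hx) = x := by
  induction l with
  | nil => cases hx
  | cons y r ih =>
    by_cases hyx : y = x
    · simp [firstIdx, hyx]
    · rcases List.mem_cons.mp hx with h | h
      · exact absurd h.symm hyx
      · simp [firstIdx, hyx, ih h]

theorem firstIdx_le {α : Type} [DecidableEq α] {l : List α} {x : α} {j : Nat} (hj : j < l.length)
    (h : l[j]'hj = x) : firstIdx l x ≤ j := by
  induction l generalizing j with
  | nil => cases hj
  | cons y r ih =>
    cases j with
    | zero => simp_all [firstIdx]
    | succ k =>
      simp only [firstIdx]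
      by_cases hyx : y = x
      · simp [hyx]
      · simpa [hyx] using Nat.succ_le_succ (ih (Nat.lt_of_succ_lt_succ hj) (by simpa using h))

-- B-side characterisation: the enc loop computes the first-occurrence index in the full list
theorem encLoop_eq {α : Type} [DecidableEq α] (full : List α) :
    ∀ (rest pre : List α) (first : PySem.Dict α Int) (out : List Int),
    full = pre ++ rest →
    (∀ x, first.get? x = if x ∈ pre then some ((firstIdx pre x : Int)) else none) →
    encLoop rest (pre.length : Int) first out
      = out ++ rest.map (fun x => ((firstIdx full x : Int))) := by
  intro rest
  induction rest with
  | nil => intro pre first out _ _; simp [encLoop]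
  | cons x rest' ih =>
    intro pre first out hfull hf
    have hcontains : first.contains x = (first.get? x).isSome := by
      simp [PySem.Dict.contains_eq_isSome_get?]
    by_cases hmem : x ∈ pre
    · -- x already seen: dict unchanged, value = firstIdx pre x = firstIdx full x
      have hget : first.get? x = some ((firstIdx pre x : Int)) := by simp [hf, hmem]
      have hc : first.contains x = true := by simp [hcontains, hget]
      have hval : first.getD x 0 = ((firstIdx pre x : Int)) :=
        PySem.Dict.getD_of_get?_eq_some _ _ hget
      have hfirst : firstIdx full x = firstIdx pre x := by
        rw [hfull]; exact firstIdx_append_of_mem _ hmem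
      have hstep : encLoop (x :: rest') (pre.length : Int) first out
          = encLoop rest' ((pre.length : Int) + 1) first
              (out ++ [((firstIdx pre x : Int))]) := by
        simp [encLoop, hc, hval]
      rw [hstep]
      have hpre' : full = (pre ++ [x]) ++ rest' := by simp [hfull]
      have hf' : ∀ y, first.get? y
          = if y ∈ pre ++ [x] then some ((firstIdx (pre ++ [x]) y : Int)) else none := by
        intro y
        by_cases hy : y ∈ pre
        · simp [hf, hy, firstIdx_append_of_mem [x] hy]
        · by_cases hyx : y = x
          · subst hyx; exact absurd hmem hy
          · simp [hf, hy, hyx]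
      have hlen : ((pre ++ [x]).length : Int) = (pre.length : Int) + 1 := by simp
      rw [← hlen, ih (pre ++ [x]) first _ hpre' hf']
      simp [hfirst]
    · -- x fresh: insert pre.length, value = pre.length = firstIdx full x
      have hget : first.get? x = none := by simp [hf, hmem]
      have hc : first.contains x = false := by simp [hcontains, hget]
      have hval : (first.insert x (pre.length : Int)).getD x 0 = ((pre.length : Int)) := by
        simp [PySem.Dict.getD_insert_self]
      have hfirst : firstIdx full x = pre.length := by
        rw [hfull]; exact firstIdx_append_self _ hmem
      have hstep : encLoop (x :: rest') (pre.length : Int) first out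
          = encLoop rest' ((pre.length : Int) + 1) (first.insert x (pre.length : Int))
              (out ++ [((pre.length : Int))]) := by
        simp [encLoop, hc, hval]
      rw [hstep]
      have hpre' : full = (pre ++ [x]) ++ rest' := by simp [hfull]
      have hf' : ∀ y, (first.insert x (pre.length : Int)).get? y
          = if y ∈ pre ++ [x] then some ((firstIdx (pre ++ [x]) y : Int)) else none := by
        intro y
        rw [PySem.Dict.get?_insert]
        by_cases hyx : y = x
        · subst hyx
          simp [firstIdx_append_self ([] : List α) hmem]
        · by_cases hy : y ∈ pre
          · simp [hyx, hf, hy, firstIdx_append_of_mem [x] hy]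
          · simp [hyx, hf, hy]
      have hlen : ((pre ++ [x]).length : Int) = (pre.length : Int) + 1 := by simp
      rw [← hlen, ih (pre ++ [x]) _ _ hpre' hf']
      simp [hfirst]

theorem encB_eq {α : Type} [DecidableEq α] (seq : List α) :
    encB seq = seq.map (fun x => ((firstIdx seq x : Int))) := by
  have h := encLoop_eq seq seq [] PySem.Dict.empty [] (by simp) (by simp)
  simpa [encB] using h

-- the bijective-pattern property both programs decide
def Pb (l : List (Char × String)) : Prop :=
  ∀ p ∈ l, ∀ q ∈ l, (p.1 = q.1 ↔ p.2 = q.2)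

-- A-side characterisation
theorem templeGo_iff : ∀ (ps seen : List (Char × String))
    (h : PySem.Dict Char String) (u : PySem.Dict String Bool),
    (∀ c s, h.get? c = some s ↔ (c, s) ∈ seen) →
    (∀ s, u.contains s = true ↔ ∃ c, (c, s) ∈ seen) →
    Pb seen →
    (templeGo ps h u = true ↔ Pb (seen ++ ps)) := by
  intro ps
  induction ps with
  | nil =>
    intro seen h u _ _ hpb
    rw [List.append_nil]
    exact iff_of_true rfl hpb
  | cons p ps' ih =>
    rintro seen h u hh hu hpb
    obtain ⟨c, s⟩ := p
    have hcont : h.contains c = (h.get? c).isSome := by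
      simp [PySem.Dict.contains_eq_isSome_get?]
    by_cases hc : (h.get? c).isSome
    · -- refer[i] in hash
      obtain ⟨s0, hs0⟩ := Option.isSome_iff_exists.mp hc
      have hs0seen : (c, s0) ∈ seen := (hh c s0).mp hs0
      by_cases hss : s0 = s
      · -- consistent: recurse with seen ++ [(c,s)]
        subst hss
        have hstep : templeGo ((c, s0) :: ps') h u = templeGo ps' h u := by
          simp [templeGo, hcont, hs0]
        have hh' : ∀ c' s', h.get? c' = some s' ↔ (c', s') ∈ seen ++ [(c, s0)] := by
          intro c' s'
          simp only [List.mem_append, List.mem_singleton]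
          constructor
          · intro hg; exact Or.inl ((hh c' s').mp hg)
          · rintro (hg | hg)
            · exact (hh c' s').mpr hg
            · rw [Prod.mk.injEq] at hg; rw [hg.1, hg.2]; exact hs0
        have hu' : ∀ s', u.contains s' = true ↔ ∃ c', (c', s') ∈ seen ++ [(c, s0)] := by
          intro s'
          simp only [List.mem_append, List.mem_singleton]
          constructor
          · rintro hg; obtain ⟨c', hc'⟩ := (hu s').mp hg; exact ⟨c', Or.inl hc'⟩
          · rintro ⟨c', hc' | hc'⟩
            · exact (hu s').mpr ⟨c', hc'⟩
            · rw [Prod.mk.injEq] at hc'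
              exact (hu s').mpr ⟨c, by rw [hc'.2]; exact hs0seen⟩
        have hpb' : Pb (seen ++ [(c, s0)]) := by
          intro p hp q hq
          simp only [List.mem_append, List.mem_singleton] at hp hq
          rcases hp with hp | hp <;> rcases hq with hq | hq
          · exact hpb p hp q hq
          · subst hq; exact hpb p hp (c, s0) hs0seen
          · subst hp; exact hpb (c, s0) hs0seen q hq
          · subst hp; subst hq; simp
        rw [hstep, ih (seen ++ [(c, s0)]) h u hh' hu' hpb', List.append_assoc,
          List.singleton_append]
      · -- mismatch: A returns False, and Pb fails
        have hstep : templeGo ((c, s) :: ps') h u = false := by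
          have : h.get? c ≠ some s := by rw [hs0]; simpa using hss
          simp [templeGo, hcont, hc, this]
        rw [hstep]
        refine iff_of_false (by simp) fun hcontra => ?_
        have h1 : (c, s0) ∈ seen ++ (c, s) :: ps' := by simp [hs0seen]
        have h2 : (c, s) ∈ seen ++ (c, s) :: ps' := by simp
        exact hss ((hcontra (c, s0) h1 (c, s) h2).mp rfl)
    · -- refer[i] not in hash
      have hnone : h.get? c = none := Option.not_isSome_iff_eq_none.mp hc
      have hcnotseen : ∀ s', (c, s') ∉ seen := by
        intro s' hmem
        have h2 : h.get? c = some s' := (hh c s').mpr hmem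
        rw [hnone] at h2
        simp at h2
      by_cases hus : u.contains s = true
      · -- target[i] already used: A returns False, Pb fails
        obtain ⟨c', hc'⟩ := (hu s).mp hus
        have hne : c' ≠ c := fun he => hcnotseen s (he ▸ hc')
        have hstep : templeGo ((c, s) :: ps') h u = false := by
          simp [templeGo, hcont, hc, hus]
        rw [hstep]
        refine iff_of_false (by simp) fun hcontra => ?_
        have h1 : (c', s) ∈ seen ++ (c, s) :: ps' := by simp [hc']
        have h2 : (c, s) ∈ seen ++ (c, s) :: ps' := by simp
        exact hne ((hcontra (c', s) h1 (c, s) h2).mpr rfl)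
      · -- fresh pair: insert into both dicts
        have hstep : templeGo ((c, s) :: ps') h u
            = templeGo ps' (h.insert c s) (u.insert s true) := by
          simp [templeGo, hcont, hc, hus]
        have hsnotseen : ∀ c', (c', s) ∉ seen := by
          intro c' hmem
          exact hus ((hu s).mpr ⟨c', hmem⟩)
        have hh' : ∀ c' s', (h.insert c s).get? c' = some s' ↔ (c', s') ∈ seen ++ [(c, s)] := by
          intro c' s'
          rw [PySem.Dict.get?_insert]
          simp only [List.mem_append, List.mem_singleton]
          by_cases hcc : c' = c
          · subst hcc
            rw [if_pos rfl]
            constructor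
            · intro he
              exact Or.inr (by rw [Option.some.inj he])
            · rintro (hg | hg)
              · exact absurd hg (hcnotseen s')
              · have hs2 : s' = s := congrArg Prod.snd hg
                rw [hs2]
          · simp only [if_neg hcc]
            constructor
            · intro hg; exact Or.inl ((hh c' s').mp hg)
            · rintro (hg | hg)
              · exact (hh c' s').mpr hg
              · rw [Prod.mk.injEq] at hg; exact absurd hg.1 hcc
        have hu' : ∀ s', (u.insert s true).contains s' = true
            ↔ ∃ c', (c', s') ∈ seen ++ [(c, s)] := by
          intro s'
          rw [PySem.Dict.contains_insert]
          simp only [List.mem_append, List.mem_singleton, Bool.or_eq_true, beq_iff_eq]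
          constructor
          · rintro (hg | hg)
            · exact ⟨c, Or.inr (by rw [hg])⟩
            · obtain ⟨c', hc'⟩ := (hu s').mp hg; exact ⟨c', Or.inl hc'⟩
          · rintro ⟨c', hc' | hc'⟩
            · exact Or.inr ((hu s').mpr ⟨c', hc'⟩)
            · rw [Prod.mk.injEq] at hc'; exact Or.inl hc'.2
        have hpb' : Pb (seen ++ [(c, s)]) := by
          intro p hp q hq
          simp only [List.mem_append, List.mem_singleton] at hp hq
          rcases hp with hp | hp <;> rcases hq with hq | hq
          · exact hpb p hp q hq
          · subst hq
            obtain ⟨pc, ps2⟩ := p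
            show pc = c ↔ ps2 = s
            constructor
            · intro he; exact absurd (by rw [← he]; exact hp) (hcnotseen ps2)
            · intro he; exact absurd (by rw [← he]; exact hp) (hsnotseen pc)
          · subst hp
            obtain ⟨qc, qs2⟩ := q
            show c = qc ↔ s = qs2
            constructor
            · intro he; exact absurd (by rw [he]; exact hq) (hcnotseen qs2)
            · intro he; exact absurd (by rw [he]; exact hq) (hsnotseen qc)
          · subst hp; subst hq; simp
        rw [hstep, ih (seen ++ [(c, s)]) _ _ hh' hu' hpb', List.append_assoc,
          List.singleton_append]

-- the bridge: equal first-occurrence encodings ↔ Pb of the zip (lengths equal)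
theorem enc_iff_Pb (r : List Char) (t : List String) (hlen : r.length = t.length) :
    ((r.map (fun x => ((firstIdx r x : Int))))
       = t.map (fun x => ((firstIdx t x : Int))))
      ↔ Pb (r.zip t) := by
  have hmemzip : ∀ p, p ∈ r.zip t ↔ ∃ (i : Nat) (h1 : i < r.length) (h2 : i < t.length),
      p = (r[i], t[i]) := by
    intro p
    rw [List.mem_iff_getElem]
    constructor
    · rintro ⟨i, hi, he⟩
      rw [List.length_zip] at hi
      refine ⟨i, by omega, by omega, ?_⟩
      rw [← he, List.getElem_zip]
    · rintro ⟨i, h1, h2, he⟩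
      refine ⟨i, by rw [List.length_zip]; omega, ?_⟩
      rw [List.getElem_zip, he]
  constructor
  · intro henc
    have hpt : ∀ (i : Nat) (h1 : i < r.length) (h2 : i < t.length),
        firstIdx r r[i] = firstIdx t t[i] := by
      intro i h1 h2
      have := congrArg (fun l => l[i]?) henc
      simp only [List.getElem?_map] at this
      rw [List.getElem?_eq_getElem h1, List.getElem?_eq_getElem h2] at this
      simp only [Option.map_some, Option.some.injEq] at this
      exact_mod_cast this
    intro p hp q hq
    obtain ⟨i, hi1, hi2, rfl⟩ := (hmemzip p).mp hp
    obtain ⟨j, hj1, hj2, rfl⟩ := (hmemzip q).mp hq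
    show r[i] = r[j] ↔ t[i] = t[j]
    constructor
    · intro he
      have h1 : firstIdx t t[i] = firstIdx t t[j] := by
        rw [← hpt i hi1 hi2, ← hpt j hj1 hj2]; simp only [he]
      have e1 := getElem_firstIdx (List.getElem_mem hi2)
      have e2 := getElem_firstIdx (List.getElem_mem hj2)
      rw [← e1, ← e2]
      simp only [h1]
    · intro he
      have h1 : firstIdx r r[i] = firstIdx r r[j] := by
        rw [hpt i hi1 hi2, hpt j hj1 hj2]; simp only [he]
      have e1 := getElem_firstIdx (List.getElem_mem hi1)
      have e2 := getElem_firstIdx (List.getElem_mem hj1)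
      rw [← e1, ← e2]
      simp only [h1]
  · intro hpb
    apply List.ext_getElem (by simp [hlen])
    intro i hi1 hi2
    simp only [List.length_map] at hi1
    have hit : i < t.length := by omega
    simp only [List.getElem_map]
    have key : firstIdx r r[i] = firstIdx t t[i] := by
      set a := firstIdx r r[i] with ha
      set b := firstIdx t t[i] with hb
      have hal : a < r.length := firstIdx_lt_length (List.getElem_mem hi1)
      have hbl : b < t.length := firstIdx_lt_length (List.getElem_mem hit)
      have hra : r[a] = r[i] := getElem_firstIdx (List.getElem_mem hi1)
      have htb : t[b] = t[i] := getElem_firstIdx (List.getElem_mem hit)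
      have hpa := hpb (r[a], t[a]'(by omega))
        ((hmemzip _).mpr ⟨a, hal, by omega, rfl⟩)
        (r[i], t[i]) ((hmemzip _).mpr ⟨i, hi1, hit, rfl⟩)
      have hpbq := hpb (r[b]'(by omega), t[b])
        ((hmemzip _).mpr ⟨b, by omega, hbl, rfl⟩)
        (r[i], t[i]) ((hmemzip _).mpr ⟨i, hi1, hit, rfl⟩)
      have hta : t[a]'(by omega) = t[i] := hpa.mp hra
      have hrb : r[b]'(by omega) = r[i] := hpbq.mpr htb
      have h1 : b ≤ a := firstIdx_le (by omega) hta
      have h2 : a ≤ b := firstIdx_le (by omega) hrb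
      omega
    exact_mod_cast key

-- ===== VERDICT (by name: the statement is the Claim_ definition above) =====
theorem temple_spec : Claim_equal_temple := by
  intro refer target _
  unfold Spec_temple temple temple_alt
  by_cases hlen : PySem.Str.len refer ≠ (target.length : Int)
  · rw [if_pos hlen, if_pos hlen]
  · rw [if_neg hlen, if_neg hlen]
    rw [not_not] at hlen
    have hlen' : refer.toList.length = target.length := by
      simpa using hlen
    rw [Bool.eq_iff_iff]
    have hA := templeGo_iff (refer.toList.zip target) [] PySem.Dict.empty PySem.Dict.empty
      (by intro c s; simp) (by intro s; simp) (by intro p hp; cases hp)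
    rw [hA]
    simp only [List.nil_append]
    rw [beq_iff_eq, encB_eq, encB_eq, enc_iff_Pb _ _ hlen']
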